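-- pv_equiv track=rewrite | github.com/2gDigitalPost/custom-rewrite | flask_api/tactic_api.py | parse_instructions_text_for_task
-- ===== SOURCE A (Python) =====
-- def parse_instructions_text_for_task(instructions, task_name):
--     instructions_text = instructions.get('instructions_text', 'Sorry, no instructions are available for this task')
--
--     task_instructions_text = ''
--     instruction_text_in_task = False
--
--     for line in instructions_text.split('\n'):
--         if line:
--             if line.startswith('!@|'):
--                 name = line.split('|')[1].strip()
--
--                 if task_name == name:
--                     task_instructions_text += name + '\n'
--                     instruction_text_in_task = True
--                 else:
--                     instruction_text_in_task = False
--             elif instruction_text_in_task: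
--                 task_instructions_text += line + '\n'
--
--     if not task_instructions_text:
--         task_instructions_text = 'Sorry, no instructions are available for this task.'
--
--     return task_instructions_text
-- ===== SOURCE B (Python) =====
-- def parse_instructions_text_for_task(instructions, task_name):
--     text = instructions.get('instructions_text', 'Sorry, no instructions are available for this task')
--
--     lines = [l for l in text.split('\n') if l]
--     pieces = []
--     i = 0
--     n = len(lines)
--     while i < n:
--         line = lines[i]
--         i += 1
--         if line.startswith('!@|') and line.split('|')[1].strip() == task_name:
--             pieces.append(task_name)
--             while i < n and not lines[i].startswith('!@|'):
--                 pieces.append(lines[i])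
--                 i += 1
--
--     result = ''.join(p + '\n' for p in pieces)
--     return result or 'Sorry, no instructions are available for this task.'
-- ===== Notes on version B (the rewrite author's own statement) =====
-- stated objective: alternative
-- what changed: Replaced A's single-pass flag-and-accumulator string building with a two-level scan: filter out empty lines, repeatedly search for a matching '!@|' header and take its whole section (lines up to the next header) at once, collecting pieces in a list joined once at the end.
import Mathlib
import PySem

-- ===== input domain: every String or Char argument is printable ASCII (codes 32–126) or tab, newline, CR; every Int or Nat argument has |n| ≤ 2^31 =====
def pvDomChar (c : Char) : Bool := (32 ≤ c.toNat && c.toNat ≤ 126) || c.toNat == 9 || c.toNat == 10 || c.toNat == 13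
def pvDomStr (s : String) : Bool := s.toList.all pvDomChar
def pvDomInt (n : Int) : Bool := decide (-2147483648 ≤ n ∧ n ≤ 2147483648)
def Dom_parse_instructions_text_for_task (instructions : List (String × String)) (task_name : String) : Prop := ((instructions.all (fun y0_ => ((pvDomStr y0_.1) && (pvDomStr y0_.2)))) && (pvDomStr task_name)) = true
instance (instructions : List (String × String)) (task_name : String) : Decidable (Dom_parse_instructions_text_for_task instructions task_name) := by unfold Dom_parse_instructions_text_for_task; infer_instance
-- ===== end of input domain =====

-- B replaces A's flag-driven single accumulator string with a two-level scan (find matching header,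
-- then take its whole section at once) over the non-empty lines, joining the pieces at the end (objective: alternative).

-- ===== PORT A =====
-- one iteration of A's for-loop: state = (task_instructions_text, instruction_text_in_task)
def pvaStep (task_name : String) (st : String × Bool) (line : String) : String × Bool :=
  if line ≠ "" then
    if PySem.Str.startswith line "!@|" then
      let name := PySem.Str.strip (PySem.List.pyGetD ((PySem.Str.split? line "|").getD []) 1 "")
      if task_name == name then (st.1 ++ (name ++ "\n"), true) else (st.1, false)
    else if st.2 then (st.1 ++ (line ++ "\n"), st.2) else st
  else st

def parse_instructions_text_for_task (instructions : List (String × String)) (task_name : String) : String :=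
  let instructions_text := (PySem.Dict.mk instructions).getD "instructions_text" "Sorry, no instructions are available for this task"
  let st := ((PySem.Str.split? instructions_text "\n").getD []).foldl (pvaStep task_name) ("", false)
  if st.1 = "" then "Sorry, no instructions are available for this task." else st.1

-- ===== PORT B =====
-- Source B's outer while loop: scan for a matching header, then the inner while = take the section's lines
def pvbGo (task_name : String) : List String → List String
  | [] => []
  | line :: rest =>
    if PySem.Str.startswith line "!@|" &&
       (PySem.Str.strip (PySem.List.pyGetD ((PySem.Str.split? line "|").getD []) 1 "") == task_name) then
      task_name :: (rest.takeWhile (fun l => !PySem.Str.startswith l "!@|")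
        ++ pvbGo task_name (rest.dropWhile (fun l => !PySem.Str.startswith l "!@|")))
    else pvbGo task_name rest
termination_by ls => ls.length
decreasing_by
  · simp only [List.length_cons]
    exact Nat.lt_succ_of_le (List.length_dropWhile_le _ _)
  · simp only [List.length_cons]
    exact Nat.lt_succ_self _

def parse_instructions_text_for_task_alt (instructions : List (String × String)) (task_name : String) : String :=
  let text := (PySem.Dict.mk instructions).getD "instructions_text" "Sorry, no instructions are available for this task"
  let lines := ((PySem.Str.split? text "\n").getD []).filter (fun l => l ≠ "")
  let result := PySem.Str.join "" ((pvbGo task_name lines).map (fun p => p ++ "\n"))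
  if result = "" then "Sorry, no instructions are available for this task." else result

-- ===== PRECONDITION & SPEC =====
def Spec_parse_instructions_text_for_task (instructions : List (String × String)) (task_name : String) (out : String) : Prop := out = parse_instructions_text_for_task_alt instructions task_name
instance (instructions : List (String × String)) (task_name : String) (out : String) : Decidable (Spec_parse_instructions_text_for_task instructions task_name out) := by unfold Spec_parse_instructions_text_for_task; infer_instance

-- ===== CLAIM (what is proved, stated in full; the proofs are below) =====
def Claim_equal_parse_instructions_text_for_task : Prop := ∀ (instructions : List (String × String)) (task_name : String), Dom_parse_instructions_text_for_task instructions task_name → Spec_parse_instructions_text_for_task instructions task_name (parse_instructions_text_for_task instructions task_name)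

-- ===== LEMMAS AND PROOFS =====

-- J ps = ''.join(p + '\n' for p in ps)
def pvJ (ps : List String) : String := PySem.Str.join "" (ps.map (fun p => p ++ "\n"))

lemma intersperse_nil_flatten (l : List (List Char)) : (List.intersperse ([] : List Char) l).flatten = l.flatten := by
  induction l with
  | nil => rfl
  | cons x xs ih => cases xs <;> simp_all [List.intersperse]

lemma pvJ_nil : pvJ [] = "" := rfl

lemma pvJ_cons (x : String) (xs : List String) : pvJ (x :: xs) = x ++ ("\n" ++ pvJ xs) := by
  apply String.toList_inj.mp
  simp [pvJ, PySem.Str.join, PySem.Chars.join, List.intercalate, intersperse_nil_flatten]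

lemma pvJ_append (xs ys : List String) : pvJ (xs ++ ys) = pvJ xs ++ pvJ ys := by
  induction xs with
  | nil => simp [pvJ_nil]
  | cons x xs ih => simp [pvJ_cons, ih, String.append_assoc]

lemma pvaStep_empty (tn : String) (st : String × Bool) : pvaStep tn st "" = st := by
  simp [pvaStep]

lemma foldl_filter_pva (tn : String) : ∀ (ls : List String) (st : String × Bool),
    ls.foldl (pvaStep tn) st = (ls.filter (fun l => l ≠ "")).foldl (pvaStep tn) st := by
  intro ls
  induction ls with
  | nil => intro st; rfl
  | cons l rest ih =>
    intro st
    by_cases h : l = ""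
    · subst h; simpa [pvaStep_empty] using ih st
    · simp [List.filter, h, List.foldl, ih]

lemma startswith_ne_empty (l : String) (h : PySem.Chars.startswith l.toList ['!', '@', '|'] = true) : l ≠ "" := by
  intro he; subst he; simp [PySem.Chars.startswith] at h

lemma pvaStep_header (tn : String) (acc : String) (b : Bool) (l : String)
    (h : PySem.Chars.startswith l.toList ['!', '@', '|'] = true) :
    pvaStep tn (acc, b) l = pvaStep tn (acc, false) l := by
  simp [pvaStep, startswith_ne_empty l h, h]

-- with the flag set, A consumes the whole section (up to the next header) into the accumulator
lemma pva_flag_true (tn : String) : ∀ (ls : List String) (acc : String), (∀ l ∈ ls, l ≠ "") →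
    ls.foldl (pvaStep tn) (acc, true)
      = (ls.dropWhile (fun l => !PySem.Str.startswith l "!@|")).foldl (pvaStep tn)
          (acc ++ pvJ (ls.takeWhile (fun l => !PySem.Str.startswith l "!@|")), true) := by
  intro ls
  induction ls with
  | nil =>
    intro acc _
    show (acc, true) = (acc ++ pvJ [], true)
    rw [pvJ_nil, String.append_empty]
  | cons l rest ih =>
    intro acc hne
    by_cases hh : PySem.Chars.startswith l.toList ['!', '@', '|'] = true
    · simp [hh, pvJ_nil]
    · have hl : l ≠ "" := hne l (by simp)
      have step : pvaStep tn (acc, true) l = (acc ++ (l ++ "\n"), true) := by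
        simp [pvaStep, hl, hh]
      have hp : (!PySem.Str.startswith l "!@|") = true := by simp [hh]
      simp only [List.foldl_cons, step, List.takeWhile_cons, List.dropWhile_cons, hp, if_true]
      rw [ih (acc ++ (l ++ "\n")) (fun x hx => hne x (by simp [hx]))]
      simp [pvJ_cons, String.append_assoc]

lemma dropWhile_head_false {α : Type} (p : α → Bool) : ∀ (xs : List α) (y : α) (ys : List α),
    xs.dropWhile p = y :: ys → p y = false := by
  intro xs
  induction xs with
  | nil => intro y ys h; simp [List.dropWhile] at h
  | cons x rest ih =>
    intro y ys h
    by_cases hp : p x = true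
    · exact ih y ys (by simpa [List.dropWhile, hp] using h)
    · simp [List.dropWhile, hp] at h
      simp [← h.1, eq_false_of_ne_true hp]

-- main invariant: on non-empty lines, A's fold from a cleared flag produces exactly B's joined pieces
lemma pva_pvb (tn : String) : ∀ (n : Nat) (ls : List String), ls.length ≤ n → (∀ l ∈ ls, l ≠ "") →
    ∀ acc, (ls.foldl (pvaStep tn) (acc, false)).1 = acc ++ pvJ (pvbGo tn ls) := by
  intro n
  induction n with
  | zero =>
    intro ls hlen _ acc
    have : ls = [] := List.eq_nil_of_length_eq_zero (Nat.le_zero.mp hlen)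
    subst this; simp [pvbGo, pvJ_nil]
  | succ n ih =>
    intro ls hlen hne acc
    cases ls with
    | nil => simp [pvbGo, pvJ_nil]
    | cons l rest =>
      have hrest : ∀ x ∈ rest, x ≠ "" := fun x hx => hne x (by simp [hx])
      have hrlen : rest.length ≤ n := by simpa using Nat.succ_le_succ_iff.mp hlen
      by_cases hh : PySem.Chars.startswith l.toList ['!', '@', '|'] = true
      · have hl : l ≠ "" := startswith_ne_empty l hh
        set name := PySem.Str.strip (PySem.List.pyGetD ((PySem.Str.split? l "|").getD []) 1 "") with hname
        by_cases hm : tn = name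
        · have step : pvaStep tn (acc, false) l = (acc ++ (name ++ "\n"), true) := by
            simp [pvaStep, hl, hh, ← hname, hm]
          have hcond : (PySem.Str.startswith l "!@|" &&
              (PySem.Str.strip (PySem.List.pyGetD ((PySem.Str.split? l "|").getD []) 1 "") == tn)) = true := by
            simp [hh, ← hname, hm]
          have hgo : pvbGo tn (l :: rest)
              = tn :: (rest.takeWhile (fun l => !PySem.Str.startswith l "!@|")
                  ++ pvbGo tn (rest.dropWhile (fun l => !PySem.Str.startswith l "!@|"))) := by
            rw [pvbGo, if_pos hcond]
          rw [List.foldl_cons, step, pva_flag_true tn rest _ hrest, hgo]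
          have hdsub : ∀ x ∈ rest.dropWhile (fun l => !PySem.Str.startswith l "!@|"), x ≠ "" :=
            fun x hx => hrest x ((List.dropWhile_sublist _).mem hx)
          have hdlen : (rest.dropWhile (fun l => !PySem.Str.startswith l "!@|")).length ≤ n :=
            le_trans (List.length_dropWhile_le _ _) hrlen
          cases hd : rest.dropWhile (fun l => !PySem.Str.startswith l "!@|") with
          | nil =>
            simp [pvbGo, pvJ_cons, ← hm, String.append_assoc]
          | cons h tl =>
            have hhh : PySem.Chars.startswith h.toList ['!', '@', '|'] = true := by
              have := dropWhile_head_false (fun l => !PySem.Str.startswith l "!@|") rest h tl hd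
              simpa using this
            rw [List.foldl_cons, pvaStep_header tn _ true h hhh, ← List.foldl_cons]
            rw [ih (h :: tl) (hd ▸ hdlen) (hd ▸ hdsub)]
            simp [pvJ_cons, pvJ_append, ← hm, String.append_assoc]
        · have step : pvaStep tn (acc, false) l = (acc, false) := by
            simp [pvaStep, hl, hh, ← hname, hm]
          have hcond : ¬ ((PySem.Str.startswith l "!@|" &&
              (PySem.Str.strip (PySem.List.pyGetD ((PySem.Str.split? l "|").getD []) 1 "") == tn)) = true) := by
            simp [Bool.and_eq_true, beq_iff_eq, ← hname, Ne.symm hm]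
          have hgo : pvbGo tn (l :: rest) = pvbGo tn rest := by
            rw [pvbGo, if_neg hcond]
          rw [List.foldl_cons, step, hgo]
          exact ih rest hrlen hrest acc
      · have hl : l ≠ "" := hne l (by simp)
        have step : pvaStep tn (acc, false) l = (acc, false) := by
          simp [pvaStep, hl, hh]
        have hcond : ¬ ((PySem.Str.startswith l "!@|" &&
            (PySem.Str.strip (PySem.List.pyGetD ((PySem.Str.split? l "|").getD []) 1 "") == tn)) = true) := by
          simp [hh]
        have hgo : pvbGo tn (l :: rest) = pvbGo tn rest := by
          rw [pvbGo, if_neg hcond]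
        rw [List.foldl_cons, step, hgo]
        exact ih rest hrlen hrest acc

-- the two result strings agree for any instructions text
lemma pv_result (tn txt : String) :
    (((PySem.Str.split? txt "\n").getD []).foldl (pvaStep tn) ("", false)).1
      = PySem.Str.join ""
          ((pvbGo tn (((PySem.Str.split? txt "\n").getD []).filter (fun l => l ≠ ""))).map
            (fun p => p ++ "\n")) := by
  rw [foldl_filter_pva]
  rw [pva_pvb tn (((PySem.Str.split? txt "\n").getD []).filter (fun l => l ≠ "")).length _ le_rfl
      (fun l hl => by simpa using List.of_mem_filter hl) ""]
  exact String.empty_append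

-- ===== VERDICT (by name: the statement is the Claim_ definition above) =====
theorem parse_instructions_text_for_task_spec : Claim_equal_parse_instructions_text_for_task := by
  intro instructions task_name _
  unfold Spec_parse_instructions_text_for_task
  show (if (((PySem.Str.split? ((PySem.Dict.mk instructions).getD "instructions_text"
          "Sorry, no instructions are available for this task") "\n").getD []).foldl
            (pvaStep task_name) ("", false)).1 = "" then
        "Sorry, no instructions are available for this task."
      else _) = _
  rw [pv_result]
  rfl
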